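-- pv_equiv track=rewrite | github.com/deadbeatshelf90/Ciar-n-s-respository | assignment.py | setLowercase
-- ===== SOURCE A (Python) =====
-- def setLowercase(x):
--     capital_letters = ['A', 'B', 'C', 'D', 'E', 'F', 'G', 'H', 'I', 'J', 'K', 'L', 'M', 'N', 'O', 'P', 'Q', 'R', 'S', 'T', 'U', 'V', 'W', 'X', 'Y', 'Z']
--     lowercase_letters = ['a', 'b', 'c', 'd', 'e', 'f', 'g', 'h', 'i', 'j', 'k', 'l', 'm', 'n', 'o', 'p', 'q', 'r', 's', 't', 'u', 'v', 'w', 'x', 'y', 'z']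
--     x = list(x)
--     string = ""
--     for a in x:
--         counter = 0
--         while counter != 26:
--             if a == capital_letters[counter]:
--                 string = string + lowercase_letters[counter]
--                 break
--             counter += 1
--         if counter == 26:
--             string = string + a
--     return string
-- ===== SOURCE B (Python) =====
-- def setLowercase(x):
--     pieces = []
--     for a in x:
--         if 'A' <= a <= 'Z':
--             pieces.append(chr(ord(a) + 32))
--         else:
--             pieces.append(a)
--     return ''.join(pieces)
-- ===== Notes on version B (the rewrite author's own statement) =====
-- stated objective: faster
-- what changed: Replaces the per-character linear scan of a 26-element capital-letter table with a closed-form ASCII range test and +32 arithmetic, collecting pieces and joining once instead of repeated string concatenation.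
import Mathlib
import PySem

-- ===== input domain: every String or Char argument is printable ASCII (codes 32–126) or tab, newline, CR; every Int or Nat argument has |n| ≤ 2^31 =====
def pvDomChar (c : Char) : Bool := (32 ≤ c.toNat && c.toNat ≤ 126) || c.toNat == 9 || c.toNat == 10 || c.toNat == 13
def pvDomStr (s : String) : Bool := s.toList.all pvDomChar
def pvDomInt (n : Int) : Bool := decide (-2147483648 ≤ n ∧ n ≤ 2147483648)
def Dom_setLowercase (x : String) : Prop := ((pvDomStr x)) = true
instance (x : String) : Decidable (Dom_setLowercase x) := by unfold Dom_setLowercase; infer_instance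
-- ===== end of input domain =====

-- B replaces A's per-character linear scan of a 26-entry capital-letter table with a closed-form
-- ASCII range test and +32 arithmetic, joining collected pieces once (idiomatic).

-- ===== PORT A =====
def pvCapitals : List Char :=
  ['A','B','C','D','E','F','G','H','I','J','K','L','M','N','O','P','Q','R','S','T','U','V','W','X','Y','Z']
def pvLowers : List Char :=
  ['a','b','c','d','e','f','g','h','i','j','k','l','m','n','o','p','q','r','s','t','u','v','w','x','y','z']

-- Python's 'while counter != 26' loop for one character a, threading 'string'.
-- (Guard written as 26 ≤ counter for totality; counter starts at 0 and steps by 1, so it fires exactly at 26.)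
def pvInner (a : Char) (string : String) (counter : Nat) : String :=
  if 26 ≤ counter then string ++ String.ofList [a]
  else if a = pvCapitals.getD counter 'A' then string ++ String.ofList [pvLowers.getD counter 'a']
  else pvInner a string (counter + 1)
termination_by 26 - counter
decreasing_by omega

def setLowercase (x : String) : String :=
  x.toList.foldl (fun string a => pvInner a string 0) ""

-- ===== PORT B =====
def pvLowerChar (a : Char) : Char :=
  if 'A' ≤ a ∧ a ≤ 'Z' then Char.ofNat (a.toNat + 32) else a

def setLowercase_alt (x : String) : String :=
  String.ofList (x.toList.map pvLowerChar)

-- ===== PRECONDITION & SPEC =====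
def Spec_setLowercase (x : String) (out : String) : Prop := out = setLowercase_alt x
instance (x : String) (out : String) : Decidable (Spec_setLowercase x out) := by unfold Spec_setLowercase; infer_instance

-- ===== CLAIM (what is proved, stated in full; the proofs are below) =====
def Claim_equal_setLowercase : Prop := ∀ (x : String), Dom_setLowercase x → Spec_setLowercase x (setLowercase x)

-- ===== LEMMAS AND PROOFS =====

lemma pvUpper_mem {a : Char} (h : 'A' ≤ a ∧ a ≤ 'Z') : a ∈ pvCapitals := by
  obtain ⟨h1, h2⟩ := h
  simp [Char.le_def] at h1 h2
  have h1' : 65 ≤ a.toNat := h1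
  have h2' : a.toNat ≤ 90 := h2
  have ha : a = Char.ofNat a.toNat := (Char.ofNat_toNat a).symm
  rw [ha]
  interval_cases (a.toNat) <;> decide

lemma pvInner_notmem (a : Char) (h : a ∉ pvCapitals) :
    ∀ (k counter : Nat), 26 - counter = k → ∀ s, pvInner a s counter = s ++ String.ofList [a] := by
  intro k
  induction k with
  | zero =>
    intro counter hk s
    rw [pvInner, if_pos (by omega)]
  | succ n ih =>
    intro counter hk s
    have hc : counter < 26 := by omega
    have hne : a ≠ pvCapitals.getD counter 'A' := by
      intro he
      apply h
      rw [he, List.getD_eq_getElem?_getD, List.getElem?_eq_getElem (by simpa [pvCapitals] using hc)]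
      simp [List.getElem_mem]
    rw [pvInner, if_neg (by omega), if_neg hne]
    exact ih (counter + 1) (by omega) s

set_option maxRecDepth 8192 in
lemma pvInner_eq (a : Char) (s : String) :
    pvInner a s 0 = s ++ String.ofList [pvLowerChar a] := by
  by_cases h : 'A' ≤ a ∧ a ≤ 'Z'
  · have hmem : a ∈ pvCapitals := pvUpper_mem h
    fin_cases hmem <;>
      simp [pvInner, pvCapitals, pvLowers, pvLowerChar, Char.le_def]
  · have hmem : a ∉ pvCapitals := fun hm => by
      fin_cases hm <;> exact h (by decide)
    rw [pvInner_notmem a hmem 26 0 rfl s]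
    simp [pvLowerChar, h]

lemma pvFold_eq (l : List Char) : ∀ s : String,
    l.foldl (fun string a => pvInner a string 0) s = s ++ String.ofList (l.map pvLowerChar) := by
  induction l with
  | nil =>
    intro s
    simp
  | cons a t ih =>
    intro s
    rw [List.foldl_cons, pvInner_eq, ih, String.append_assoc, ← String.ofList_append]
    simp

-- ===== VERDICT (by name: the statement is the Claim_ definition above) =====
theorem setLowercase_spec : Claim_equal_setLowercase := by
  intro x _
  unfold Spec_setLowercase setLowercase setLowercase_alt
  simpa using pvFold_eq x.toList ""
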